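-- pv_equiv track=rewrite | github.com/arianasatryan/Style_Breach_Detection | for_eng/eng_method.py | get_starts_of_sentsegs
-- ===== SOURCE A (Python) =====
-- def get_starts_of_sentsegs(sentseg):
--     start_of_sentseg = {}
--     i = 1
--     length = 0
--     for item in sentseg:
--         start_of_sentseg[i] = length
--         i += 1
--         length += (len(item) + 1)
--     return start_of_sentseg
-- ===== SOURCE B (Python) =====
-- def get_starts_of_sentsegs(sentseg):
--     # Phase 1: build prefix-offset table; Phase 2: index it.
--     offs = [0]
--     for item in sentseg:
--         offs.append(offs[-1] + len(item) + 1)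
--     return {k + 1: offs[k] for k in range(len(sentseg))}
-- ===== Notes on version B (the rewrite author's own statement) =====
-- stated objective: alternative
-- what changed: A threads a dict, a 1-based counter and a running length through one loop; B first builds the prefix-offset table (offs[k] = total shifted length of the first k segments) and then constructs the dict by indexing that table over range(len(sentseg)).
import Mathlib
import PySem

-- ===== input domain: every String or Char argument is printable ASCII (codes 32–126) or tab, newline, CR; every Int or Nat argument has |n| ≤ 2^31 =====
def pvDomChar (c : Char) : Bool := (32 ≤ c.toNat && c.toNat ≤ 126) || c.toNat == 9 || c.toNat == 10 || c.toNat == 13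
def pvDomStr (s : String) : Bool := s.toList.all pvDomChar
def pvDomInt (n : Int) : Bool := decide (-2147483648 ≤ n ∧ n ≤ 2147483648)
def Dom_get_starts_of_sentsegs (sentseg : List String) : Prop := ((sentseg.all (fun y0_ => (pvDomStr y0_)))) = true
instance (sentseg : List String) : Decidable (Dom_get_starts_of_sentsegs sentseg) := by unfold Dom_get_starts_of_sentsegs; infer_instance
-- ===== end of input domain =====

-- B replaces A's single loop threading (dict, counter, running length) by a two-phase
-- decomposition: first build the prefix-offset table, then index it; same cost (objective: alternative).

-- ===== PORT A =====
-- the 'for item in sentseg' loop with state (start_of_sentseg, i, length)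
def pvA_loop : List String → PySem.Dict Int Int → Int → Int → PySem.Dict Int Int
  | [], d, _, _ => d
  | item :: rest, d, i, length =>
      pvA_loop rest (d.insert i length) (i + 1) (length + (PySem.Str.len item + 1))

def get_starts_of_sentsegs (sentseg : List String) : List (Int × Int) :=
  (pvA_loop sentseg PySem.Dict.empty 1 0).items

-- ===== PORT B =====
-- phase 1: offs = [0]; for item: offs.append(offs[-1] + len(item) + 1)
def pvB_offs (sentseg : List String) : List Int :=
  sentseg.foldl
    (fun offs item => offs ++ [(PySem.List.pyGet? offs (-1)).getD 0 + (PySem.Str.len item + 1)])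
    [(0 : Int)]

-- phase 2: {k + 1: offs[k] for k in range(len(sentseg))} (keys are fresh and distinct)
def get_starts_of_sentsegs_alt (sentseg : List String) : List (Int × Int) :=
  let offs := pvB_offs sentseg
  ((PySem.List.pyRange 0 (sentseg.length : Int) 1).foldl
      (fun d k => d.insert (k + 1) ((PySem.List.pyGet? offs k).getD 0))
      PySem.Dict.empty).items

-- ===== PRECONDITION & SPEC =====
def Spec_get_starts_of_sentsegs (sentseg : List String) (out : List (Int × Int)) : Prop := out = get_starts_of_sentsegs_alt sentseg
instance (sentseg : List String) (out : List (Int × Int)) : Decidable (Spec_get_starts_of_sentsegs sentseg out) := by unfold Spec_get_starts_of_sentsegs; infer_instance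

-- ===== CLAIM (what is proved, stated in full; the proofs are below) =====
def Claim_equal_get_starts_of_sentsegs : Prop := ∀ (sentseg : List String), Dom_get_starts_of_sentsegs sentseg → Spec_get_starts_of_sentsegs sentseg (get_starts_of_sentsegs sentseg)

-- ===== LEMMAS AND PROOFS =====

-- prefix offset: total shifted length of the first k segments
def pvPref (l : List String) (k : Nat) : Int :=
  ((l.take k).map (fun s => PySem.Str.len s + 1)).sum

lemma pvPref_zero (l : List String) : pvPref l 0 = 0 := rfl

lemma pvPref_cons_succ (s : String) (l : List String) (k : Nat) :
    pvPref (s :: l) (k + 1) = (PySem.Str.len s + 1) + pvPref l k := by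
  simp [pvPref]

-- A's loop appends the fresh keys i, i+1, … with the running offsets
lemma pvA_loop_items (l : List String) (d : PySem.Dict Int Int) (i len0 : Int)
    (hfresh : ∀ j : Int, i ≤ j → d.contains j = false) :
    (pvA_loop l d i len0).items =
      d.items ++ (List.range l.length).map (fun (k : Nat) => (i + (k : Int), len0 + pvPref l k)) := by
  induction l generalizing d i len0 with
  | nil => simp [pvA_loop]
  | cons s rest ih =>
      rw [pvA_loop, ih]
      · rw [PySem.Dict.items_insert_of_not_contains (h := hfresh i le_rfl)]
        rw [List.length_cons, List.range_succ_eq_map]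
        simp only [List.map_cons, List.map_map, List.append_assoc]
        congr 1
        simp only [Nat.cast_zero, add_zero, pvPref_zero, List.cons_append, List.nil_append]
        congr 1
        apply List.map_congr_left
        intro k _
        simp only [Function.comp]
        rw [pvPref_cons_succ]
        simp only [Prod.mk.injEq]
        refine ⟨by push_cast; ring, by ring⟩
      · intro j hj
        rw [PySem.Dict.contains_insert]
        have : (j == i) = false := by simp; omega
        rw [this, hfresh j (by omega), Bool.or_self]

-- B's offset table is the table of prefix offsets
lemma pvB_offs_eq (l : List String) :
    pvB_offs l = (List.range (l.length + 1)).map (fun k => pvPref l k) := by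
  induction l using List.reverseRecOn with
  | nil => simp [pvB_offs, pvPref]
  | append_singleton l s ih =>
      unfold pvB_offs at ih ⊢
      rw [List.foldl_append, ih, List.foldl_cons, List.foldl_nil]
      have hlen : (l ++ [s]).length + 1 = (l.length + 1) + 1 := by simp
      rw [hlen, List.range_succ (n := l.length + 1), List.map_append]
      congr 1
      · apply List.map_congr_left
        intro k hk
        simp only [List.mem_range] at hk
        simp only [pvPref]
        rw [List.take_append_of_le_length (by omega)]
      · rw [List.range_succ, List.map_append]
        simp only [List.map_cons, List.map_nil]
        rw [PySem.List.pyGet?_neg_one_append_singleton]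
        simp only [Option.getD_some]
        congr 2
        simp [pvPref, List.take_of_length_le, List.sum_append]

theorem get_starts_of_sentsegs_spec_aux (sentseg : List String) :
    get_starts_of_sentsegs sentseg = get_starts_of_sentsegs_alt sentseg := by
  unfold get_starts_of_sentsegs get_starts_of_sentsegs_alt
  rw [pvA_loop_items sentseg PySem.Dict.empty 1 0 (by intro j _; simp)]
  rw [PySem.Dict.items_foldl_insert_fresh]
  · rw [PySem.List.pyRange_one]
    simp only [PySem.Dict.empty, List.nil_append, zero_add, Int.sub_zero,
      Int.toNat_natCast, List.map_map]
    apply List.map_congr_left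
    intro k hk
    simp only [List.mem_range] at hk
    simp only [Function.comp]
    rw [pvB_offs_eq]
    rw [PySem.List.pyGet?_natCast]
    rw [List.getElem?_map, List.getElem?_range (by omega)]
    simp only [Option.map_some, Option.getD_some]
    simp only [Prod.mk.injEq]
    exact ⟨by ring, trivial⟩
  · intro a _; simp
  · rw [PySem.List.pyRange_one]
    simp only [zero_add, Int.sub_zero, Int.toNat_natCast, List.map_map]
    refine List.Nodup.map ?_ (List.nodup_range)
    intro a b h
    simpa using h

-- ===== VERDICT (by name: the statement is the Claim_ definition above) =====
theorem get_starts_of_sentsegs_spec : Claim_equal_get_starts_of_sentsegs := by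
  intro sentseg _
  exact get_starts_of_sentsegs_spec_aux sentseg
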